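-- pv_equiv track=rewrite | github.com/ayukyo/alltoolkit | Python/shell_sort_utils/mod.py | generate_pratt_gaps
-- ===== SOURCE A (Python) =====
-- from typing import List, TypeVar, Callable, Optional, Tuple, Generator, Any
--
-- def generate_pratt_gaps(n: int) -> List[int]:
--     """
--     生成 Pratt 间隔序列（3-smooth 数）
--
--     只包含 2^a * 3^b 形式的数
--
--     时间复杂度: O(n log²n)
--
--     Args:
--         n: 数据长度
--
--     Returns:
--         间隔序列（从大到小）
--     """
--     gaps = set()
--
--     # 生成所有 2^a * 3^b < n 的数
--     a = 0
--     while 2**a < n: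
--         b = 0
--         while 2**a * 3**b < n:
--             gaps.add(2**a * 3**b)
--             b += 1
--         a += 1
--
--     return sorted(gaps, reverse=True)
-- ===== SOURCE B (Python) =====
-- from typing import List
--
-- def generate_pratt_gaps(n: int) -> List[int]:
--     """3-smooth numbers below n, descending, built as an ascending three-way merge."""
--     seq = []
--     q2 = []
--     q3 = []
--     cur = 1
--     while cur < n:
--         seq.append(cur)
--         q2.append(cur * 2)
--         q3.append(cur * 3)
--         cur = q2[0] if q2[0] < q3[0] else q3[0]
--         if q2[0] == cur:
--             q2.pop(0)
--         if q3[0] == cur: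
--             q3.pop(0)
--     seq.reverse()
--     return seq
-- ===== Notes on version B (the rewrite author's own statement) =====
-- stated objective: alternative
-- what changed: B replaces A's nested exponent enumeration into a set followed by a descending sort with an incremental merge (Dijkstra/Hamming style, two pending-multiple queues) that emits the smooth gap values below n already in ascending order and then reverses; no set and no sort are needed.
import Mathlib
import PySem

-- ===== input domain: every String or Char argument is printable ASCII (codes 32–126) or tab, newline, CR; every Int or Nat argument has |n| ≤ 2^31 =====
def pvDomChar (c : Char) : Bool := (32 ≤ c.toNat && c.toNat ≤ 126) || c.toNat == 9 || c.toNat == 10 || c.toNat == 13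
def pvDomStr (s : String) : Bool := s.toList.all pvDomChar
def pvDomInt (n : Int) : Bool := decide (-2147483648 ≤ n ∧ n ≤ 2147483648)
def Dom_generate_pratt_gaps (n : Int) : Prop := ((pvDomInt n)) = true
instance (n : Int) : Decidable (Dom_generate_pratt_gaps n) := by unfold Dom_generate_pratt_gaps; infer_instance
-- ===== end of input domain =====

-- B replaces A's nested exponent enumeration + set + descending sort by an incremental
-- three-way merge that emits the 3-smooth numbers below n already in ascending order
-- (objective: alternative decomposition, no sort needed).

-- ===== PORT A =====
-- inner while loop: 'while 2**a * 3**b < n: gaps.add(2**a * 3**b); b += 1'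
def pvInnerA (n : Int) (a b : Nat) (gaps : PySem.Set Int) : PySem.Set Int :=
  if (2:Int)^a * 3^b < n then
    pvInnerA n a (b+1) (PySem.Set.add gaps ((2:Int)^a * 3^b))
  else gaps
termination_by (n - (2:Int)^a * 3^b).toNat
decreasing_by
  have h1 : (0:Int) < (2:Int)^a * 3^b := by positivity
  have h2 : (2:Int)^a * 3^(b+1) = 3 * ((2:Int)^a * 3^b) := by ring
  omega

-- outer while loop: 'while 2**a < n: … ; a += 1'
def pvOuterA (n : Int) (a : Nat) (gaps : PySem.Set Int) : PySem.Set Int :=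
  if (2:Int)^a < n then
    pvOuterA n (a+1) (pvInnerA n a 0 gaps)
  else gaps
termination_by (n - (2:Int)^a).toNat
decreasing_by
  have h1 : (0:Int) < (2:Int)^a := by positivity
  omega

def generate_pratt_gaps (n : Int) : List Int :=
  PySem.List.sorted (pvOuterA n 0 PySem.Set.empty) (fun x => x) true

-- ===== PORT B =====
-- the merge loop of Source B; fuel = n.toNat is only a totality guard (the loop body is run
-- at most (n-1) times because cur strictly increases each iteration, proved below).
-- q2[0]/q3[0] are read only right after an append, so the lists are nonempty and
-- 'headD _ 0' is exactly Python's q[0]; 'pop(0)' is List.tail.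
def pvBLoop (n : Int) (fuel : Nat) (seq q2 q3 : List Int) (cur : Int) : List Int :=
  match fuel with
  | 0 => seq
  | f+1 =>
    if cur < n then
      let seq' := seq ++ [cur]
      let q2' := q2 ++ [cur * 2]
      let q3' := q3 ++ [cur * 3]
      let h2 := q2'.headD 0
      let h3 := q3'.headD 0
      let cur' := if h2 < h3 then h2 else h3
      let q2'' := if h2 == cur' then q2'.tail else q2'
      let q3'' := if h3 == cur' then q3'.tail else q3'
      pvBLoop n f seq' q2'' q3'' cur'
    else seq

def generate_pratt_gaps_alt (n : Int) : List Int :=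
  (pvBLoop n n.toNat [] [] [] 1).reverse

-- ===== PRECONDITION & SPEC =====
def Spec_generate_pratt_gaps (n : Int) (out : List Int) : Prop := out = generate_pratt_gaps_alt n
instance (n : Int) (out : List Int) : Decidable (Spec_generate_pratt_gaps n out) := by unfold Spec_generate_pratt_gaps; infer_instance

-- ===== CLAIM (what is proved, stated in full; the proofs are below) =====
def Claim_equal_generate_pratt_gaps : Prop := ∀ (n : Int), Dom_generate_pratt_gaps n → Spec_generate_pratt_gaps n (generate_pratt_gaps n)

-- ===== LEMMAS AND PROOFS =====

/-- `m` is 3-smooth: of the form 2^a * 3^b. -/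
def Smooth (m : Int) : Prop := ∃ a b : Nat, m = 2^a * 3^b

theorem smooth_pos {m : Int} (h : Smooth m) : 1 ≤ m := by
  obtain ⟨a, b, rfl⟩ := h
  have : (0:Int) < 2^a * 3^b := by positivity
  omega

theorem smooth_one : Smooth 1 := ⟨0, 0, by norm_num⟩

theorem smooth_mul_two {m : Int} (h : Smooth m) : Smooth (m * 2) := by
  obtain ⟨a, b, rfl⟩ := h; exact ⟨a+1, b, by ring⟩

theorem smooth_mul_three {m : Int} (h : Smooth m) : Smooth (m * 3) := by
  obtain ⟨a, b, rfl⟩ := h; exact ⟨a, b+1, by ring⟩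

/-- every 3-smooth number other than 1 is 2y or 3y for a smaller 3-smooth y. -/
theorem smooth_decomp {m : Int} (h : Smooth m) (hm : 1 < m) :
    ∃ y, Smooth y ∧ 1 ≤ y ∧ y < m ∧ (m = y * 2 ∨ m = y * 3) := by
  obtain ⟨a, b, rfl⟩ := h
  match a, b with
  | 0, 0 => norm_num at hm
  | a+1, b =>
      have h1 : (0:Int) < (2:Int)^a * 3^b := by positivity
      refine ⟨2^a * 3^b, ⟨a, b, rfl⟩, by omega, ?_, Or.inl (by ring)⟩
      have h2 : (2:Int)^(a+1) * 3^b = 2 * (2^a * 3^b) := by ring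
      omega
  | 0, b+1 =>
      have h1 : (0:Int) < (2:Int)^0 * 3^b := by positivity
      refine ⟨2^0 * 3^b, ⟨0, b, rfl⟩, by omega, ?_, Or.inr (by ring)⟩
      have h2 : (2:Int)^0 * 3^(b+1) = 3 * (2^0 * 3^b) := by ring
      omega

-- ---------- A side: membership of the generated set ----------

theorem mem_pvInnerA (n : Int) (a b : Nat) (g : PySem.Set Int) (x : Int) :
    x ∈ pvInnerA n a b g ↔ x ∈ g ∨ ∃ b', b ≤ b' ∧ (2:Int)^a * 3^b' < n ∧ x = 2^a * 3^b' := by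
  induction b, g using pvInnerA.induct n a with
  | case1 b g hlt ih =>
      rw [pvInnerA, if_pos hlt, ih, PySem.Set.mem_add]
      constructor
      · rintro ((hx | rfl) | ⟨b', hb', hlt', rfl⟩)
        · exact Or.inl hx
        · exact Or.inr ⟨b, le_refl b, hlt, rfl⟩
        · exact Or.inr ⟨b', by omega, hlt', rfl⟩
      · rintro (hx | ⟨b', hb', hlt', rfl⟩)
        · exact Or.inl (Or.inl hx)
        · rcases eq_or_lt_of_le hb' with rfl | hb''
          · exact Or.inl (Or.inr rfl)
          · exact Or.inr ⟨b', by omega, hlt', rfl⟩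
  | case2 b g hge =>
      rw [pvInnerA, if_neg hge]
      constructor
      · exact Or.inl
      · rintro (hx | ⟨b', hb', hlt', rfl⟩)
        · exact hx
        · exfalso
          have hmono : (3:Int)^b ≤ 3^b' := pow_le_pow_right₀ (by norm_num) hb'
          have h2 : (0:Int) < 2^a := by positivity
          have : (2:Int)^a * 3^b ≤ 2^a * 3^b' := by
            exact mul_le_mul_of_nonneg_left hmono (by omega)
          omega

theorem nodup_pvInnerA (n : Int) (a b : Nat) (g : PySem.Set Int) (hg : g.Nodup) :
    (pvInnerA n a b g).Nodup := by
  revert hg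
  induction b, g using pvInnerA.induct n a with
  | case1 b g hlt ih =>
      intro hg; rw [pvInnerA, if_pos hlt]; exact ih (PySem.Set.nodup_add g _ hg)
  | case2 b g hge => intro hg; rw [pvInnerA, if_neg hge]; exact hg

theorem mem_pvOuterA (n : Int) (a : Nat) (g : PySem.Set Int) (x : Int) :
    x ∈ pvOuterA n a g ↔ x ∈ g ∨ ∃ a' b', a ≤ a' ∧ (2:Int)^a' * 3^b' < n ∧ x = 2^a' * 3^b' := by
  induction a, g using pvOuterA.induct n with
  | case1 a g hlt ih =>
      rw [pvOuterA, if_pos hlt, ih]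
      constructor
      · rintro (hx | ⟨a', b', ha', hlt', rfl⟩)
        · rw [mem_pvInnerA] at hx
          rcases hx with hx | ⟨b', _, hlt', rfl⟩
          · exact Or.inl hx
          · exact Or.inr ⟨a, b', le_refl a, hlt', rfl⟩
        · exact Or.inr ⟨a', b', by omega, hlt', rfl⟩
      · rintro (hx | ⟨a', b', ha', hlt', rfl⟩)
        · exact Or.inl (by rw [mem_pvInnerA]; exact Or.inl hx)
        · rcases eq_or_lt_of_le ha' with rfl | ha''
          · exact Or.inl (by rw [mem_pvInnerA]; exact Or.inr ⟨b', by omega, hlt', rfl⟩)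
          · exact Or.inr ⟨a', b', by omega, hlt', rfl⟩
  | case2 a g hge =>
      rw [pvOuterA, if_neg hge]
      constructor
      · exact Or.inl
      · rintro (hx | ⟨a', b', ha', hlt', rfl⟩)
        · exact hx
        · exfalso
          have hmono : (2:Int)^a ≤ 2^a' := pow_le_pow_right₀ (by norm_num) ha'
          have h3 : (1:Int) ≤ 3^b' := one_le_pow₀ (by norm_num)
          have h2 : (0:Int) < 2^a' := by positivity
          have : (2:Int)^a' ≤ 2^a' * 3^b' := le_mul_of_one_le_right (by omega) h3
          omega

theorem nodup_pvOuterA (n : Int) (a : Nat) (g : PySem.Set Int) (hg : g.Nodup) :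
    (pvOuterA n a g).Nodup := by
  revert hg
  induction a, g using pvOuterA.induct n with
  | case1 a g hlt ih =>
      intro hg; rw [pvOuterA, if_pos hlt]; exact ih (nodup_pvInnerA n a 0 g hg)
  | case2 a g hge => intro hg; rw [pvOuterA, if_neg hge]; exact hg

theorem mem_gapsA (n : Int) (x : Int) :
    x ∈ pvOuterA n 0 PySem.Set.empty ↔ Smooth x ∧ x < n := by
  rw [mem_pvOuterA]
  constructor
  · rintro (hx | ⟨a, b, _, hlt, rfl⟩)
    · simp [PySem.Set.empty] at hx
    · exact ⟨⟨a, b, rfl⟩, hlt⟩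
  · rintro ⟨⟨a, b, rfl⟩, hlt⟩
    exact Or.inr ⟨a, b, Nat.zero_le a, hlt, rfl⟩

-- ---------- B side: the merge invariant ----------

def BInv (n : Int) (seq q2 q3 : List Int) (cur : Int) : Prop :=
  seq.Pairwise (· < ·) ∧
  (∀ m, m ∈ seq ↔ Smooth m ∧ m < cur) ∧
  Smooth cur ∧
  (∀ m ∈ seq, m < n) ∧
  q2 = (seq.filter (fun x => decide (cur < x * 2))).map (· * 2) ∧
  q3 = (seq.filter (fun x => decide (cur < x * 3))).map (· * 3)

theorem headD_mem {l : List Int} (h : l ≠ []) : l.headD 0 ∈ l := by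
  cases l with
  | nil => exact absurd rfl h
  | cons a t => simp

theorem headD_le_of_pairwise {l : List Int} (h : l.Pairwise (· < ·)) :
    ∀ y ∈ l, l.headD 0 ≤ y := by
  cases l with
  | nil => intro y hy; cases hy
  | cons a t =>
      intro y hy
      rcases List.mem_cons.mp hy with rfl | hyt
      · simp
      · have := (List.pairwise_cons.mp h).1 y hyt
        simp only [List.headD_cons]; omega

/-- one queue of the merge: after the pop step it again consists of the k-multiples
of exactly the seq-elements whose k-multiple exceeds the new value `cur'`. -/
theorem queue_update (k cur cur' : Int) (seq' : List Int) (hk : 0 < k)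
    (hpw : seq'.Pairwise (· < ·))
    (hsm : ∀ x ∈ seq', Smooth x)
    (hkS : ∀ x, Smooth x → Smooth (x * k))
    (hleast : ∀ m, Smooth m → cur < m → cur' ≤ m)
    (hlt : cur < cur')
    (hne : (seq'.filter (fun x => decide (cur < x * k))) ≠ []) :
    (if (((seq'.filter (fun x => decide (cur < x * k))).map (· * k)).headD 0 == cur')
      then ((seq'.filter (fun x => decide (cur < x * k))).map (· * k)).tail
      else (seq'.filter (fun x => decide (cur < x * k))).map (· * k))
    = (seq'.filter (fun x => decide (cur' < x * k))).map (· * k) := by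
  obtain ⟨x0, rest, hq⟩ : ∃ x0 rest, seq'.filter (fun x => decide (cur < x * k)) = x0 :: rest := by
    cases h : seq'.filter (fun x => decide (cur < x * k)) with
    | nil => exact absurd h hne
    | cons a t => exact ⟨a, t, rfl⟩
  have hFpw : (x0 :: rest).Pairwise (· < ·) := hq ▸ List.Pairwise.filter _ hpw
  have hx0F : x0 ∈ seq'.filter (fun x => decide (cur < x * k)) := by
    rw [hq]; exact List.mem_cons_self
  have hx0seq : x0 ∈ seq' := (List.mem_filter.mp hx0F).1
  have hx0gt : cur < x0 * k := by simpa using (List.mem_filter.mp hx0F).2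
  have hx0ge : cur' ≤ x0 * k := hleast _ (hkS x0 (hsm x0 hx0seq)) hx0gt
  have hfilt : seq'.filter (fun x => decide (cur' < x * k))
      = (seq'.filter (fun x => decide (cur < x * k))).filter (fun x => !(x * k == cur')) := by
    rw [List.filter_filter]
    apply List.filter_congr
    intro x hx
    have hsx : Smooth (x * k) := hkS x (hsm x hx)
    by_cases h1 : cur < x * k
    · have h2 := hleast _ hsx h1
      by_cases h3 : x * k = cur'
      · simp [h3]
      · have h4 : cur' < x * k := lt_of_le_of_ne h2 (Ne.symm h3)
        simp [h1, h3, h4]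
    · have h5 : ¬ cur' < x * k := fun hcl => h1 (lt_trans hlt hcl)
      simp [h1, h5]
  rw [hfilt, hq]
  simp only [List.map_cons, List.headD_cons, List.tail_cons, List.filter_cons]
  by_cases hc : x0 * k = cur'
  · have hrest : ∀ x ∈ rest, ((fun x => !(x * k == cur')) x) = true := by
      intro x hx
      have hx0x : x0 < x := (List.pairwise_cons.mp hFpw).1 x hx
      have hmul : x0 * k < x * k := mul_lt_mul_of_pos_right hx0x hk
      have : x * k ≠ cur' := by rw [← hc]; exact ne_of_gt hmul
      simpa using this
    rw [if_pos (by simpa using hc), if_neg (by simpa using hc),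
        List.filter_eq_self.mpr hrest]
  · have hall : ∀ x ∈ rest, ((fun x => !(x * k == cur')) x) = true := by
      intro x hx
      have hx0x : x0 < x := (List.pairwise_cons.mp hFpw).1 x hx
      have hmul : x0 * k < x * k := mul_lt_mul_of_pos_right hx0x hk
      have : x * k ≠ cur' := ne_of_gt (lt_of_le_of_lt hx0ge hmul)
      simpa using this
    rw [if_neg (by simpa using hc), if_pos (by simpa using hc),
        List.filter_eq_self.mpr hall, List.map_cons]

theorem binv_step (n : Int) (seq q2 q3 : List Int) (cur h2 h3 cur' : Int)
    (hI : BInv n seq q2 q3 cur) (hcur : cur < n)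
    (hh2 : h2 = (q2 ++ [cur * 2]).headD 0) (hh3 : h3 = (q3 ++ [cur * 3]).headD 0)
    (hc' : cur' = if h2 < h3 then h2 else h3) :
    BInv n (seq ++ [cur])
      (if h2 == cur' then (q2 ++ [cur * 2]).tail else q2 ++ [cur * 2])
      (if h3 == cur' then (q3 ++ [cur * 3]).tail else q3 ++ [cur * 3])
      cur' ∧ cur < cur' := by
  obtain ⟨hpw, hmem, hsc, hbnd, hq2, hq3⟩ := hI
  have hcur1 : 1 ≤ cur := smooth_pos hsc
  have hltcur : ∀ x ∈ seq, x < cur := fun x hx => ((hmem x).mp hx).2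
  have hpw' : (seq ++ [cur]).Pairwise (· < ·) := by
    rw [List.pairwise_append]
    refine ⟨hpw, List.pairwise_singleton _ _, ?_⟩
    intro x hx y hy
    rw [List.mem_singleton] at hy; subst hy
    exact hltcur x hx
  have hmem' : ∀ m, m ∈ seq ++ [cur] ↔ Smooth m ∧ m ≤ cur := by
    intro m
    rw [List.mem_append, List.mem_singleton]
    constructor
    · rintro (hm | rfl)
      · exact ⟨((hmem m).mp hm).1, le_of_lt ((hmem m).mp hm).2⟩
      · exact ⟨hsc, le_refl _⟩
    · rintro ⟨hs, hle⟩
      rcases eq_or_lt_of_le hle with rfl | hlt'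
      · exact Or.inr rfl
      · exact Or.inl ((hmem m).mpr ⟨hs, hlt'⟩)
  have hsm' : ∀ x ∈ seq ++ [cur], Smooth x := fun x hx => ((hmem' x).mp hx).1
  have hc2 : cur < cur * 2 := by omega
  have hc3 : cur < cur * 3 := by omega
  have hq2' : q2 ++ [cur * 2] = ((seq ++ [cur]).filter (fun x => decide (cur < x * 2))).map (· * 2) := by
    rw [List.filter_append, List.map_append, ← hq2]
    simp [hc2]
  have hq3' : q3 ++ [cur * 3] = ((seq ++ [cur]).filter (fun x => decide (cur < x * 3))).map (· * 3) := by
    rw [List.filter_append, List.map_append, ← hq3]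
    simp [hc3]
  have hne2 : ((seq ++ [cur]).filter (fun x => decide (cur < x * 2))) ≠ [] := by
    rw [List.filter_append]; simp [hc2]
  have hne3 : ((seq ++ [cur]).filter (fun x => decide (cur < x * 3))) ≠ [] := by
    rw [List.filter_append]; simp [hc3]
  have hq2pw : (q2 ++ [cur * 2]).Pairwise (· < ·) := by
    rw [hq2', List.pairwise_map]
    exact (List.Pairwise.filter _ hpw').imp (fun h => by omega)
  have hq3pw : (q3 ++ [cur * 3]).Pairwise (· < ·) := by
    rw [hq3', List.pairwise_map]
    exact (List.Pairwise.filter _ hpw').imp (fun h => by omega)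
  have hq2mem : ∀ y ∈ q2 ++ [cur * 2], cur < y ∧ Smooth y := by
    intro y hy
    rw [hq2'] at hy
    obtain ⟨x, hxF, rfl⟩ := List.mem_map.mp hy
    have hgt : cur < x * 2 := by simpa using (List.mem_filter.mp hxF).2
    exact ⟨hgt, smooth_mul_two (hsm' x (List.mem_filter.mp hxF).1)⟩
  have hq3mem : ∀ y ∈ q3 ++ [cur * 3], cur < y ∧ Smooth y := by
    intro y hy
    rw [hq3'] at hy
    obtain ⟨x, hxF, rfl⟩ := List.mem_map.mp hy
    have hgt : cur < x * 3 := by simpa using (List.mem_filter.mp hxF).2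
    exact ⟨hgt, smooth_mul_three (hsm' x (List.mem_filter.mp hxF).1)⟩
  have hh2m : h2 ∈ q2 ++ [cur * 2] := hh2 ▸ headD_mem (by simp)
  have hh3m : h3 ∈ q3 ++ [cur * 3] := hh3 ▸ headD_mem (by simp)
  have hcur'gt : cur < cur' := by
    rw [hc']; split
    · exact (hq2mem h2 hh2m).1
    · exact (hq3mem h3 hh3m).1
  have hcur'sm : Smooth cur' := by
    rw [hc']; split
    · exact (hq2mem h2 hh2m).2
    · exact (hq3mem h3 hh3m).2
  have hcple2 : cur' ≤ h2 := by rw [hc']; split <;> omega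
  have hcple3 : cur' ≤ h3 := by rw [hc']; split <;> omega
  have hh2le : ∀ y ∈ q2 ++ [cur * 2], h2 ≤ y := hh2 ▸ headD_le_of_pairwise hq2pw
  have hh3le : ∀ y ∈ q3 ++ [cur * 3], h3 ≤ y := hh3 ▸ headD_le_of_pairwise hq3pw
  -- cur' is the least 3-smooth number above cur
  have hleast : ∀ m, Smooth m → cur < m → cur' ≤ m := by
    have key : ∀ M : Nat, ∀ m : Int, m.toNat ≤ M → Smooth m → cur < m → cur' ≤ m := by
      intro M
      induction M with
      | zero =>
          intro m hm hs hc
          have := smooth_pos hs; omega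
      | succ M ih =>
          intro m hm hs hc
          have h1 : 1 < m := by omega
          obtain ⟨y, hys, hy1, hylt, hcase⟩ := smooth_decomp hs h1
          by_cases hyc : cur < y
          · have := ih y (by omega) hys hyc
            omega
          · have hymem : y ∈ seq ++ [cur] := (hmem' y).mpr ⟨hys, not_lt.mp hyc⟩
            rcases hcase with rfl | rfl
            · have hmm : y * 2 ∈ q2 ++ [cur * 2] := by
                rw [hq2']
                exact List.mem_map.mpr ⟨y, List.mem_filter.mpr ⟨hymem, by simpa using hc⟩, rfl⟩
              have := hh2le _ hmm
              omega
            · have hmm : y * 3 ∈ q3 ++ [cur * 3] := by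
                rw [hq3']
                exact List.mem_map.mpr ⟨y, List.mem_filter.mpr ⟨hymem, by simpa using hc⟩, rfl⟩
              have := hh3le _ hmm
              omega
    intro m hs hcm
    exact key m.toNat m (le_refl _) hs hcm
  have hmemN : ∀ m, m ∈ seq ++ [cur] ↔ Smooth m ∧ m < cur' := by
    intro m
    rw [hmem' m]
    constructor
    · rintro ⟨hs, hle⟩; exact ⟨hs, by omega⟩
    · rintro ⟨hs, hlt'⟩
      refine ⟨hs, ?_⟩
      by_contra hgt
      rw [not_le] at hgt
      have := hleast m hs hgt
      omega
  have hbndN : ∀ m ∈ seq ++ [cur], m < n := by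
    intro m hm
    rcases List.mem_append.mp hm with hm | hm
    · exact hbnd m hm
    · rw [List.mem_singleton] at hm; omega
  refine ⟨⟨hpw', hmemN, hcur'sm, hbndN, ?_, ?_⟩, hcur'gt⟩
  · have hu := queue_update 2 cur cur' (seq ++ [cur]) (by norm_num) hpw' hsm'
      (fun x hx => smooth_mul_two hx) hleast hcur'gt hne2
    rw [← hq2'] at hu
    rw [hh2]; exact hu
  · have hu := queue_update 3 cur cur' (seq ++ [cur]) (by norm_num) hpw' hsm'
      (fun x hx => smooth_mul_three hx) hleast hcur'gt hne3
    rw [← hq3'] at hu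
    rw [hh3]; exact hu

theorem bLoop_spec (fuel : Nat) (n : Int) : ∀ (seq q2 q3 : List Int) (cur : Int),
    BInv n seq q2 q3 cur → (n - cur).toNat ≤ fuel →
    (pvBLoop n fuel seq q2 q3 cur).Pairwise (· < ·) ∧
    (∀ m, m ∈ pvBLoop n fuel seq q2 q3 cur ↔ Smooth m ∧ m < n) := by
  induction fuel with
  | zero =>
      intro seq q2 q3 cur hI hf
      obtain ⟨hpw, hmem, hsc, hbnd, -, -⟩ := hI
      refine ⟨hpw, fun m => ?_⟩
      simp only [pvBLoop]
      rw [hmem m]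
      constructor
      · rintro ⟨hs, hlt⟩; exact ⟨hs, hbnd m ((hmem m).mpr ⟨hs, hlt⟩)⟩
      · rintro ⟨hs, hlt⟩; exact ⟨hs, by omega⟩
  | succ f ih =>
      intro seq q2 q3 cur hI hf
      by_cases hc : cur < n
      · have hstep := binv_step n seq q2 q3 cur _ _ _ hI hc rfl rfl rfl
        have hfuel : (n - (if (q2 ++ [cur * 2]).headD 0 < (q3 ++ [cur * 3]).headD 0
            then (q2 ++ [cur * 2]).headD 0 else (q3 ++ [cur * 3]).headD 0)).toNat ≤ f := by
          have := hstep.2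
          omega
        have := ih _ _ _ _ hstep.1 hfuel
        simpa only [pvBLoop, if_pos hc] using this
      · obtain ⟨hpw, hmem, hsc, hbnd, -, -⟩ := hI
        refine ⟨?_, fun m => ?_⟩
        · simpa only [pvBLoop, if_neg hc] using hpw
        · simp only [pvBLoop, if_neg hc]
          rw [hmem m]
          constructor
          · rintro ⟨hs, hlt⟩; exact ⟨hs, hbnd m ((hmem m).mpr ⟨hs, hlt⟩)⟩
          · rintro ⟨hs, hlt⟩; exact ⟨hs, by omega⟩

theorem binv_init (n : Int) : BInv n [] [] [] 1 := by
  refine ⟨List.Pairwise.nil, ?_, smooth_one, by simp, by simp, by simp⟩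
  intro m
  simp only [List.mem_nil_iff, false_iff, not_and]
  intro hs
  have := smooth_pos hs; omega

-- ===== VERDICT (by name: the statement is the Claim_ definition above) =====
theorem generate_pratt_gaps_spec : Claim_equal_generate_pratt_gaps := by
  intro n _
  unfold Spec_generate_pratt_gaps generate_pratt_gaps generate_pratt_gaps_alt
  have hmain := bLoop_spec n.toNat n [] [] [] 1 (binv_init n) (by omega)
  set r := pvBLoop n n.toNat [] [] [] 1 with hr
  apply PySem.List.sorted_rev_eq_of_perm_of_pairwise_gt
  · -- r.reverse is a permutation of the gaps set
    rw [List.perm_ext_iff_of_nodup]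
    · intro x
      rw [List.mem_reverse, hmain.2 x, mem_gapsA]
    · exact (List.nodup_reverse).mpr (hmain.1.imp ne_of_lt)
    · exact nodup_pvOuterA n 0 PySem.Set.empty (List.nodup_nil)
  · simpa [List.pairwise_reverse] using hmain.1
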